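-- pv_equiv track=rewrite | github.com/ParticulaCode/GoChessSDK | python/gochess_sdk.py | _build_led_masks
-- ===== SOURCE A (Python) =====
-- from typing import Callable, Optional, List, Dict, Any, Union
--
-- def _build_led_masks(squares: List[tuple]) -> tuple:
--     """Convert a list of ``(row, col)`` (1-indexed) to firmware LED bitmasks.
--
--     Returns ``(mask_rows1to4, mask_rows5to8)``.
--     """
--     mask1 = 0  # rows 1-4 (LED indices 0-31)
--     mask2 = 0  # rows 5-8 (LED indices 32-63)
--     for row, col in squares:
--         if not (1 <= row <= 8 and 1 <= col <= 8):
--             raise ValueError(f"Square ({row}, {col}) out of range 1-8.")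
--         if row <= 4:
--             mask1 |= 1 << ((row - 1) * 8 + (col - 1))
--         else:
--             mask2 |= 1 << ((row - 5) * 8 + (col - 1))
--     return mask1, mask2
-- ===== SOURCE B (Python) =====
-- def _build_led_masks(squares):
--     """Convert a list of ``(row, col)`` (1-indexed) to firmware LED bitmasks.
--
--     Returns ``(mask_rows1to4, mask_rows5to8)``.
--     """
--     for row, col in squares:
--         if not (1 <= row <= 8 and 1 <= col <= 8):
--             raise ValueError(f"Square ({row}, {col}) out of range 1-8.")
--     present = set(squares)
--     mask1 = 0
--     mask2 = 0
--     for i in range(32):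
--         if (i // 8 + 1, i % 8 + 1) in present:
--             mask1 |= 1 << i
--         if (i // 8 + 5, i % 8 + 1) in present:
--             mask2 |= 1 << i
--     return mask1, mask2
-- ===== Notes on version B (the rewrite author's own statement) =====
-- stated objective: alternative
-- what changed: B inverts the traversal: after validating once, it builds a hash set of the squares and loops over the 32 fixed LED positions of each half-board, setting bit i iff the corresponding (row,col) is in the set, instead of A's single pass over the input squares or-ing a bit per square.
import Mathlib
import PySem

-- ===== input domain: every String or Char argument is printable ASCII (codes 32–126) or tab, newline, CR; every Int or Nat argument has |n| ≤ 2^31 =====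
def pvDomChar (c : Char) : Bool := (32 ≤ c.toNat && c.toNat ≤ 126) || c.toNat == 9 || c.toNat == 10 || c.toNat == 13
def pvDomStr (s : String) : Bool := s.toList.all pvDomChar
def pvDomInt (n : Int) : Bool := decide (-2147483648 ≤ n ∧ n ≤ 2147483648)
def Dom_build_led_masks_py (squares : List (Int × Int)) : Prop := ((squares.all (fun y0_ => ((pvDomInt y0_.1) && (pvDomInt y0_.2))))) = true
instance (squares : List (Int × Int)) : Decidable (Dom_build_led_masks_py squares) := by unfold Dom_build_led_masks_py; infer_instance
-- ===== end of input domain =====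

-- B inverts the traversal: it validates, builds a set of the squares, and loops over the
-- 32 LED positions of each half-board testing membership, instead of A's pass over the
-- input squares. Equivalence of return values on Pre_ (A raises outside Pre_; so does B).

-- ===== PORT A =====
-- A's loop: two masks, branch on row <= 4. Python raises ValueError on an out-of-range
-- square; those inputs are excluded by Pre_ below (the port's value there is not claimed).
def aLoop : List (Int × Int) → Nat → Nat → Nat × Nat
  | [], m1, m2 => (m1, m2)
  | (r, c) :: rest, m1, m2 =>
    if r ≤ 4 then
      aLoop rest (m1 ||| (1 <<< ((r - 1) * 8 + (c - 1)).toNat)) m2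
    else
      aLoop rest m1 (m2 ||| (1 <<< ((r - 5) * 8 + (c - 1)).toNat))

def build_led_masks_py (squares : List (Int × Int)) : Int × Int :=
  let p := aLoop squares 0 0
  ((p.1 : Int), (p.2 : Int))

-- ===== PORT B =====
-- B's loop over the 32 LED positions of one half-board (row offset `off` is 1 or 5):
-- bit i is set iff square (i//8 + off, i%8 + 1) is in the set of input squares.
def bHalf (present : PySem.Set (Int × Int)) (off : Int) : Nat :=
  (List.range 32).foldl
    (fun m i =>
      if (((i / 8 : Nat) : Int) + off, ((i % 8 : Nat) : Int) + 1) ∈ present then m ||| (1 <<< i)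
      else m) 0

def build_led_masks_py_alt (squares : List (Int × Int)) : Int × Int :=
  let present := PySem.Set.ofList squares
  ((bHalf present 1 : Int), (bHalf present 5 : Int))

-- ===== PRECONDITION & SPEC =====
-- Pre_ excludes exactly the inputs on which Python A raises ValueError: a square with
-- row or col outside 1..8.
def Pre_build_led_masks_py (squares : List (Int × Int)) : Prop :=
  ∀ p ∈ squares, 1 ≤ p.1 ∧ p.1 ≤ 8 ∧ 1 ≤ p.2 ∧ p.2 ≤ 8
instance (squares : List (Int × Int)) : Decidable (Pre_build_led_masks_py squares) := by unfold Pre_build_led_masks_py; infer_instance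

def pvWitness_build_led_masks_py : (List (Int × Int)) := [(1, 1), (4, 8), (5, 1), (8, 8)]

def Spec_build_led_masks_py (squares : List (Int × Int)) (out : Int × Int) : Prop := out = build_led_masks_py_alt squares
instance (squares : List (Int × Int)) (out : Int × Int) : Decidable (Spec_build_led_masks_py squares out) := by unfold Spec_build_led_masks_py; infer_instance

-- ===== CLAIM (what is proved, stated in full; the proofs are below) =====
def Claim_equal_build_led_masks_py : Prop := ∀ (squares : List (Int × Int)), Dom_build_led_masks_py squares → Pre_build_led_masks_py squares → Spec_build_led_masks_py squares (build_led_masks_py squares)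

-- ===== LEMMAS AND PROOFS =====

-- Which input squares light bit j of the low / high mask in A's accumulation.
def hit1 (j : Nat) (p : Int × Int) : Bool :=
  decide (p.1 ≤ 4) && decide (((p.1 - 1) * 8 + (p.2 - 1)).toNat = j)
def hit2 (j : Nat) (p : Int × Int) : Bool :=
  decide (¬ p.1 ≤ 4) && decide (((p.1 - 5) * 8 + (p.2 - 1)).toNat = j)

theorem aLoop_fst_testBit (l : List (Int × Int)) (m1 m2 j : Nat) :
    ((aLoop l m1 m2).1).testBit j = (m1.testBit j || l.any (hit1 j)) := by
  induction l generalizing m1 m2 with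
  | nil => simp [aLoop]
  | cons p rest ih =>
    obtain ⟨r, c⟩ := p
    by_cases hr : r ≤ 4 <;>
      simp [aLoop, hr, ih, hit1, Nat.one_shiftLeft, Nat.testBit_two_pow,
        Bool.or_assoc]

theorem aLoop_snd_testBit (l : List (Int × Int)) (m1 m2 j : Nat) :
    ((aLoop l m1 m2).2).testBit j = (m2.testBit j || l.any (hit2 j)) := by
  induction l generalizing m1 m2 with
  | nil => simp [aLoop]
  | cons p rest ih =>
    obtain ⟨r, c⟩ := p
    by_cases hr : r ≤ 4 <;>
      simp [aLoop, hr, ih, hit2, Nat.one_shiftLeft, Nat.testBit_two_pow,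
        Bool.or_assoc]

theorem foldl_or_testBit (P : Nat → Prop) [DecidablePred P] (L : List Nat) (m j : Nat) :
    ((L.foldl (fun m i => if P i then m ||| (1 <<< i) else m) m).testBit j)
      = (m.testBit j || (decide (j ∈ L) && decide (P j))) := by
  induction L generalizing m with
  | nil => simp
  | cons i L ih =>
    simp only [List.foldl_cons, ih, List.mem_cons]
    by_cases hij : j = i
    · subst hij
      by_cases hp : P j <;> simp [hp, Nat.one_shiftLeft, Nat.testBit_two_pow]
    · by_cases hp : P i <;>
        simp [hp, hij, Nat.one_shiftLeft, Ne.symm hij]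

theorem bHalf_testBit (present : PySem.Set (Int × Int)) (off : Int) (j : Nat) :
    (bHalf present off).testBit j
      = (decide (j < 32) && decide ((((j / 8 : Nat) : Int) + off, ((j % 8 : Nat) : Int) + 1) ∈ present)) := by
  unfold bHalf
  rw [foldl_or_testBit (fun i => (((i / 8 : Nat) : Int) + off, ((i % 8 : Nat) : Int) + 1) ∈ present)]
  simp

-- Bridge: on in-range squares, A's "some square sets bit j of the low mask" is exactly
-- B's "square (j/8+1, j%8+1) is present and j < 32" (and likewise for the high mask).
theorem any_hit1_iff (l : List (Int × Int)) (j : Nat)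
    (hpre : ∀ p ∈ l, 1 ≤ p.1 ∧ p.1 ≤ 8 ∧ 1 ≤ p.2 ∧ p.2 ≤ 8) :
    l.any (hit1 j) = (decide (j < 32) && decide ((((j / 8 : Nat) : Int) + 1, ((j % 8 : Nat) : Int) + 1) ∈ l)) := by
  rw [Bool.eq_iff_iff]
  simp only [List.any_eq_true, hit1, Bool.and_eq_true, decide_eq_true_eq]
  constructor
  · rintro ⟨⟨r, c⟩, hmem, hr4, he⟩
    have hb := hpre _ hmem
    simp only at hb hr4
    have h1 : ((r - 1) * 8 + (c - 1)).toNat = (r - 1).toNat * 8 + (c - 1).toNat := by omega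
    have hj : j = (r - 1).toNat * 8 + (c - 1).toNat := by omega
    have hd : j / 8 = (r - 1).toNat ∧ j % 8 = (c - 1).toNat := by omega
    refine ⟨by omega, ?_⟩
    have : (((j / 8 : Nat) : Int) + 1, ((j % 8 : Nat) : Int) + 1) = (r, c) := by
      rw [hd.1, hd.2, Prod.mk.injEq]; omega
    rw [this]; exact hmem
  · rintro ⟨hj, hmem⟩
    refine ⟨_, hmem, by simp; omega, ?_⟩
    simp only
    omega

theorem any_hit2_iff (l : List (Int × Int)) (j : Nat)
    (hpre : ∀ p ∈ l, 1 ≤ p.1 ∧ p.1 ≤ 8 ∧ 1 ≤ p.2 ∧ p.2 ≤ 8) :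
    l.any (hit2 j) = (decide (j < 32) && decide ((((j / 8 : Nat) : Int) + 5, ((j % 8 : Nat) : Int) + 1) ∈ l)) := by
  rw [Bool.eq_iff_iff]
  simp only [List.any_eq_true, hit2, Bool.and_eq_true, decide_eq_true_eq]
  constructor
  · rintro ⟨⟨r, c⟩, hmem, hr4, he⟩
    have hb := hpre _ hmem
    simp only at hb hr4
    have hj : j = (r - 5).toNat * 8 + (c - 1).toNat := by omega
    have hd : j / 8 = (r - 5).toNat ∧ j % 8 = (c - 1).toNat := by omega
    refine ⟨by omega, ?_⟩
    have : (((j / 8 : Nat) : Int) + 5, ((j % 8 : Nat) : Int) + 1) = (r, c) := by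
      rw [hd.1, hd.2, Prod.mk.injEq]; omega
    rw [this]; exact hmem
  · rintro ⟨hj, hmem⟩
    refine ⟨_, hmem, by simp; omega, ?_⟩
    simp only
    omega

-- ===== VERDICT (by name: the statement is the Claim_ definition above) =====
theorem build_led_masks_py_spec : Claim_equal_build_led_masks_py := by
  intro squares _ hpre
  unfold Spec_build_led_masks_py build_led_masks_py build_led_masks_py_alt
  have hmem : ∀ q, q ∈ PySem.Set.ofList squares ↔ q ∈ squares := fun q =>
    PySem.Set.mem_ofList ..
  refine Prod.ext ?_ ?_ <;> simp only <;> congr 1 <;>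
    apply Nat.eq_of_testBit_eq <;> intro j
  · rw [aLoop_fst_testBit, bHalf_testBit, any_hit1_iff squares j hpre]
    simp only [Nat.zero_testBit, Bool.false_or]
    exact congrArg₂ (· && ·) rfl (decide_eq_decide.mpr (hmem _)).symm
  · rw [aLoop_snd_testBit, bHalf_testBit, any_hit2_iff squares j hpre]
    simp only [Nat.zero_testBit, Bool.false_or]
    exact congrArg₂ (· && ·) rfl (decide_eq_decide.mpr (hmem _)).symm
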